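-- pv_equiv track=rewrite | github.com/HeX-ecutioner/dsa-space | src/Algorithms/Two Pointers/Expert/CountPairsLessThanK_ProductOrSum/solution.py | count_pairs_with_sum_less_than
-- ===== SOURCE A (Python) =====
-- from typing import List
--
-- def count_pairs_with_sum_less_than(nums: List[int], k: int) -> int:
--     """
--     Count number of index pairs (i<j) such that nums[i] + nums[j] < k.
--     Approach:
--     - Sort nums, use two pointers left=0, right=n-1
--     - If nums[left] + nums[right] < k => all pairs (left, left+1..right) are valid -> add (right-left) and left++
--     - Else right--.
--     Time: O(n log n) to sort + O(n) two-pointer pass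
--     """
--     nums.sort()
--     left, right = 0, len(nums) - 1
--     count = 0
--     while left < right:
--         s = nums[left] + nums[right]
--         if s < k:
--             count += (right - left)
--             left += 1
--         else:
--             right -= 1
--     return count
-- ===== SOURCE B (Python) =====
-- from typing import List
-- from bisect import bisect_left
--
-- def count_pairs_with_sum_less_than(nums: List[int], k: int) -> int:
--     # Sort in place (same side effect as A), then for each j count the earlier
--     # elements strictly below k - nums[j] by binary search on the sorted prefix.
--     nums.sort()
--     total = 0
--     for j in range(len(nums)):
--         total += bisect_left(nums, k - nums[j], 0, j)
--     return total
-- ===== Notes on version B (the rewrite author's own statement) =====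
-- stated objective: alternative
-- what changed: Replaces the two-pointer convergence pass over the sorted array with an index loop that binary-searches (bisect_left) the sorted prefix [0,j) for each j, summing the counts.
import Mathlib
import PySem

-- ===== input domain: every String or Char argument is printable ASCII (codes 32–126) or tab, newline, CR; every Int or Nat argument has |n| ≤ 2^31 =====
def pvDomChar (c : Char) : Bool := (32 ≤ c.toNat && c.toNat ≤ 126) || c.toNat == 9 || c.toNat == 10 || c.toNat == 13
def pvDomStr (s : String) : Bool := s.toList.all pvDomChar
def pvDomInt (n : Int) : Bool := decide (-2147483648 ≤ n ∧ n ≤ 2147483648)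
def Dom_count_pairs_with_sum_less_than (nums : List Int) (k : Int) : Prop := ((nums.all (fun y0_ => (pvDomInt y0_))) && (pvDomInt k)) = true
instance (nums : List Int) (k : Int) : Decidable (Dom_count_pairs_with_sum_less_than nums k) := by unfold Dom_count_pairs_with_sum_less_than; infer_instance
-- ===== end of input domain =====

-- B replaces A's two-pointer pass with a per-index bisect_left count over the sorted prefix
-- (same O(n log n) cost, alternative algorithm); the equivalence proved is about the RETURN
-- value only — both Pythons sort nums in place, performing the same mutation.

-- ===== PORT A =====
-- the `while left < right` loop of A, as recursion on the window width
def pvLoopA (s : List Int) (k : Int) (left right count : Int) : Int :=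
  if _h : left < right then
    let t := PySem.List.pyGetD s left 0 + PySem.List.pyGetD s right 0
    if t < k then pvLoopA s k (left + 1) right (count + (right - left))
    else pvLoopA s k left (right - 1) count
  else count
termination_by (right - left).toNat
decreasing_by all_goals omega

def count_pairs_with_sum_less_than (nums : List Int) (k : Int) : Int :=
  let s := PySem.List.sorted nums (fun x => x)
  pvLoopA s k 0 ((s.length : Int) - 1) 0

-- ===== PORT B =====
def count_pairs_with_sum_less_than_alt (nums : List Int) (k : Int) : Int :=
  let s := PySem.List.sorted nums (fun x => x)
  (PySem.List.pyRange 0 (s.length : Int) 1).foldl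
    (fun total j =>
      total + (PySem.List.bisectLeft (s.take j.toNat) (k - PySem.List.pyGetD s j 0) : Int))
    0

-- ===== PRECONDITION & SPEC =====
def Spec_count_pairs_with_sum_less_than (nums : List Int) (k : Int) (out : Int) : Prop := out = count_pairs_with_sum_less_than_alt nums k
instance (nums : List Int) (k : Int) (out : Int) : Decidable (Spec_count_pairs_with_sum_less_than nums k out) := by unfold Spec_count_pairs_with_sum_less_than; infer_instance

-- ===== CLAIM (what is proved, stated in full; the proofs are below) =====
def Claim_equal_count_pairs_with_sum_less_than : Prop := ∀ (nums : List Int) (k : Int), Dom_count_pairs_with_sum_less_than nums k → Spec_count_pairs_with_sum_less_than nums k (count_pairs_with_sum_less_than nums k)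

-- ===== LEMMAS AND PROOFS =====

-- number of i with l ≤ i < j and s[i] + s[j] < k
def pvRowC (s : List Int) (k : Int) (l j : Nat) : Nat :=
  ((List.range' l (j - l)).filter (fun i => decide (s.getD i 0 + s.getD j 0 < k))).length

-- number of pairs i < j ≤ r with l ≤ i and s[i] + s[j] < k
def pvP (s : List Int) (k : Int) (l r : Nat) : Nat :=
  ((List.range (r + 1)).map (pvRowC s k l)).sum

theorem pvRowC_zero (s : List Int) (k : Int) (l j : Nat) (h : j ≤ l) : pvRowC s k l j = 0 := by
  unfold pvRowC
  have : j - l = 0 := by omega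
  simp [this]

theorem pvRowC_succ (s : List Int) (k : Int) (l j : Nat) (h : l < j) :
    pvRowC s k l j =
      (if s.getD l 0 + s.getD j 0 < k then 1 else 0) + pvRowC s k (l + 1) j := by
  unfold pvRowC
  have h1 : j - l = (j - (l + 1)) + 1 := by omega
  rw [h1, List.range'_succ, List.filter_cons]
  by_cases hc : s.getD l 0 + s.getD j 0 < k
  · rw [if_pos (by simpa using hc), if_pos hc, List.length_cons, Nat.add_comm]
  · rw [if_neg (by simpa using hc), if_neg hc, Nat.zero_add]

theorem pvP_empty (s : List Int) (k : Int) (l r : Nat) (h : r ≤ l) : pvP s k l r = 0 := by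
  unfold pvP
  apply List.sum_eq_zero
  intro x hx
  simp only [List.mem_map, List.mem_range] at hx
  obtain ⟨j, hj, rfl⟩ := hx
  exact pvRowC_zero s k l j (by omega)

-- sorted monotone access
theorem pvMono (s : List Int) (hs : s.Pairwise (· ≤ ·)) (i j : Nat)
    (hij : i ≤ j) (hj : j < s.length) : s.getD i 0 ≤ s.getD j 0 := by
  rcases Nat.eq_or_lt_of_le hij with rfl | hlt
  · exact le_refl _
  · rw [List.getD_eq_getElem s 0 (by omega), List.getD_eq_getElem s 0 hj]
    exact List.pairwise_iff_getElem.mp hs i j (by omega) hj hlt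

theorem pvSumIndicator (l : Nat) : ∀ m, ((List.range m).map (fun j => if l < j then (1 : Nat) else 0)).sum = m - (l + 1) := by
  intro m
  induction m with
  | zero => simp
  | succ m ih =>
    rw [List.range_succ, List.map_append, List.sum_append, ih]
    by_cases h : l < m <;> simp [h] <;> omega

theorem pvP_left (s : List Int) (k : Int) (hs : s.Pairwise (· ≤ ·)) (l r : Nat)
    (hlr : l < r) (hr : r < s.length) (hk : s.getD l 0 + s.getD r 0 < k) :
    pvP s k l r = (r - l) + pvP s k (l + 1) r := by
  unfold pvP
  have hmap : ((List.range (r + 1)).map (pvRowC s k l)).sum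
      = ((List.range (r + 1)).map (fun j => (if l < j then (1:Nat) else 0) + pvRowC s k (l + 1) j)).sum := by
    apply congrArg
    apply List.map_congr_left
    intro j hj
    simp only [List.mem_range] at hj
    by_cases hlj : l < j
    · rw [pvRowC_succ s k l j hlj]
      have hjk : s.getD l 0 + s.getD j 0 < k := by
        have := pvMono s hs j r (by omega) hr
        omega
      rw [if_pos hjk, if_pos hlj]
    · rw [pvRowC_zero s k l j (by omega), pvRowC_zero s k (l+1) j (by omega)]
      simp [hlj]
  rw [hmap]
  have : ((List.range (r + 1)).map (fun j => (if l < j then (1:Nat) else 0) + pvRowC s k (l + 1) j)).sum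
      = ((List.range (r + 1)).map (fun j => if l < j then (1:Nat) else 0)).sum
        + ((List.range (r + 1)).map (pvRowC s k (l + 1))).sum := by
    simp [← List.sum_map_add]
  rw [this, pvSumIndicator l (r + 1)]
  omega

theorem pvP_right (s : List Int) (k : Int) (hs : s.Pairwise (· ≤ ·)) (l r : Nat)
    (hlr : l < r) (hr : r < s.length) (hk : ¬ s.getD l 0 + s.getD r 0 < k) :
    pvP s k l r = pvP s k l (r - 1) := by
  unfold pvP
  have h1 : r = (r - 1) + 1 := by omega
  have hrow : pvRowC s k l r = 0 := by
    unfold pvRowC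
    rw [List.length_eq_zero_iff, List.filter_eq_nil_iff]
    intro i hi
    simp only [List.mem_range'] at hi
    have hi' : l ≤ i ∧ i < r := by omega
    have := pvMono s hs l i hi'.1 (by omega)
    simp only [decide_eq_true_eq]
    omega
  calc ((List.range (r + 1)).map (pvRowC s k l)).sum
      = ((List.range r).map (pvRowC s k l)).sum + pvRowC s k l r := by
        rw [List.range_succ, List.map_append, List.sum_append]; simp
    _ = ((List.range ((r - 1) + 1)).map (pvRowC s k l)).sum := by rw [hrow, ← h1]; simp

theorem pvLoopA_eq (s : List Int) (k : Int) (hs : s.Pairwise (· ≤ ·)) :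
    ∀ (n l r : Nat) (c : Int), r - l ≤ n → r < s.length →
      pvLoopA s k (l : Int) (r : Int) c = c + (pvP s k l r : Int) := by
  intro n
  induction n with
  | zero =>
    intro l r c hn hr
    rw [pvLoopA]
    have : ¬ ((l : Int) < (r : Int)) := by omega
    rw [dif_neg this, pvP_empty s k l r (by omega)]
    simp
  | succ n ih =>
    intro l r c hn hr
    rw [pvLoopA]
    by_cases hlr : (l : Int) < (r : Int)
    · rw [dif_pos hlr]
      have hlr' : l < r := by omega
      simp only [PySem.List.pyGetD_natCast]
      by_cases hk : s.getD l 0 + s.getD r 0 < k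
      · rw [if_pos hk]
        have : (l : Int) + 1 = ((l + 1 : Nat) : Int) := by push_cast; ring
        rw [this, ih (l + 1) r _ (by omega) hr,
          pvP_left s k hs l r hlr' hr hk]
        push_cast
        omega
      · rw [if_neg hk]
        have : (r : Int) - 1 = ((r - 1 : Nat) : Int) := by push_cast [Nat.cast_sub (by omega : 1 ≤ r)]; ring
        rw [this, ih l (r - 1) _ (by omega) (by omega),
          pvP_right s k hs l r hlr' hr hk]
    · rw [dif_neg hlr, pvP_empty s k l r (by omega)]
      simp

theorem pvFilterLt (b : Nat) : ∀ j, ((List.range j).filter (fun i => decide (i < b))).length = min b j := by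
  intro j
  induction j with
  | zero => simp
  | succ j ih =>
    rw [List.range_succ, List.filter_append, List.length_append, ih]
    by_cases h : j < b <;> simp [h] <;> omega

theorem pvBisect_eq_rowC (s : List Int) (k : Int) (hs : s.Pairwise (· ≤ ·)) (j : Nat)
    (hj : j < s.length) :
    PySem.List.bisectLeft (s.take j) (k - s.getD j 0) = pvRowC s k 0 j := by
  set t := k - s.getD j 0 with ht
  have hsub : (s.take j).Pairwise (· ≤ ·) := List.Pairwise.sublist (List.take_sublist j s) hs
  obtain ⟨hb1, hb2, hb3⟩ := PySem.List.bisectLeft_spec (s.take j) t hsub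
  have hlen : (s.take j).length = j := by simp; omega
  set b := PySem.List.bisectLeft (s.take j) t with hbdef
  unfold pvRowC
  have hpred : ∀ i, i ∈ List.range' 0 (j - 0) →
      (decide (s.getD i 0 + s.getD j 0 < k) = decide (i < b)) := by
    intro i hi
    simp only [List.mem_range'] at hi
    have hij : i < j := by omega
    have hi' : i < (s.take j).length := by omega
    have hgi : (s.take j)[i] = s.getD i 0 := by
      rw [List.getElem_take, List.getD_eq_getElem s 0 (by omega)]
    by_cases hib : i < b
    · have := hb2 i hi' hib
      rw [hgi] at this
      simp only [decide_eq_decide]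
      constructor <;> intro <;> [exact hib; omega]
    · have := hb3 i hi' (by omega)
      rw [hgi] at this
      simp only [decide_eq_decide]
      constructor <;> intro <;> [omega; omega]
  rw [List.filter_congr hpred]
  have : List.range' 0 (j - 0) = List.range j := by simp [List.range_eq_range']
  rw [this, pvFilterLt b j]
  omega

theorem pvCastSum (f : Nat → Nat) (l : List Nat) :
    (l.map (fun m => ((f m : Nat) : Int))).sum = (((l.map f).sum : Nat) : Int) := by
  induction l with
  | nil => simp
  | cons a l ih => simp [ih]

theorem pvB_eq (nums : List Int) (k : Int) :
    count_pairs_with_sum_less_than_alt nums k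
      = (((List.range (PySem.List.sorted nums (fun x => x)).length).map
          (pvRowC (PySem.List.sorted nums (fun x => x)) k 0)).sum : Int) := by
  unfold count_pairs_with_sum_less_than_alt
  set s := PySem.List.sorted nums (fun x => x) with hsdef
  have hs : s.Pairwise (· ≤ ·) := PySem.List.sorted_pairwise nums (fun x => x)
  simp only [PySem.List.pyRange_zero_natCast, List.foldl_map, PySem.List.foldl_add]
  have hcg : ∀ j ∈ List.range s.length,
      (fun (x : Nat) => ((PySem.List.bisectLeft (List.take ((x : Int)).toNat s) (k - PySem.List.pyGetD s (x : Int) 0) : Nat) : Int)) j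
        = (fun m => ((pvRowC s k 0 m : Nat) : Int)) j := by
    intro j hj
    simp only [List.mem_range] at hj
    simp only [Int.toNat_natCast, PySem.List.pyGetD_natCast]
    rw [pvBisect_eq_rowC s k hs j hj]
  rw [List.map_congr_left hcg, pvCastSum, zero_add]

theorem pvA_eq (s : List Int) (k : Int) (hs : s.Pairwise (· ≤ ·)) :
    pvLoopA s k 0 ((s.length : Int) - 1) 0
      = (((List.range s.length).map (pvRowC s k 0)).sum : Int) := by
  rcases Nat.eq_zero_or_pos s.length with h0 | hpos
  · rw [pvLoopA]
    have hlt : ¬ ((0 : Int) < (s.length : Int) - 1) := by omega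
    rw [dif_neg hlt]
    simp [h0]
  · have hcast : ((s.length : Int) - 1) = (((s.length - 1 : Nat)) : Int) := by
      push_cast [Nat.cast_sub (by omega : 1 ≤ s.length)]; ring
    have h := pvLoopA_eq s k hs (s.length - 1) 0 (s.length - 1) 0 (by omega) (by omega)
    simp only [Nat.cast_zero] at h
    rw [hcast, h]
    unfold pvP
    have hsucc : (s.length - 1) + 1 = s.length := by omega
    rw [hsucc]
    ring

-- ===== VERDICT (by name: the statement is the Claim_ definition above) =====
theorem count_pairs_with_sum_less_than_spec : Claim_equal_count_pairs_with_sum_less_than := by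
  intro nums k _
  unfold Spec_count_pairs_with_sum_less_than
  rw [pvB_eq nums k]
  show pvLoopA (PySem.List.sorted nums (fun x => x)) k 0
      (((PySem.List.sorted nums (fun x => x)).length : Int) - 1) 0 = _
  exact pvA_eq (PySem.List.sorted nums (fun x => x)) k (PySem.List.sorted_pairwise nums (fun x => x))
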